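-- pv_equiv track=rewrite | github.com/shubhanesh0076/fincity_assignment | groot.py | find
-- ===== SOURCE A (Python) =====
-- def find(m, n, adj):
-- 	sweet = [0] * (n + 1)
-- 	dp = [[[ 0 for i in range(n + 1)] for i in range(n + 1)] for i in range(n + 1)]
-- 	sweet[0] = 0
--
-- 	# again assign the array into sweet
-- 	for i in range(1, m + 1):
-- 		sweet[i] = adj[i - 1]
--
-- 	# assign the base case to the DP array
-- 	for i in range(m + 1):
-- 		for k in range(n + 1):
-- 			dp[i][0][k] = 0
--
-- 		for k in range(1, n + 1):
-- 			dp[i][k][0] = -1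
--
--
-- 	for i in range(m + 1):
-- 		for j in range(1, n + 1):
-- 			for k in range(1, n + 1):
-- 				dp[i][j][k] = -1
-- 				if (i > 0 and j >= k and sweet[k] > 0 and dp[i - 1][j - k][k] != -1):
-- 					dp[i][j][k] = dp[i - 1][j - k][k] + sweet[k]
--
-- 				if (dp[i][j][k] == -1 or (dp[i][j][k - 1] != -1 and dp[i][j][k] > dp[i][j][k - 1])):
-- 					dp[i][j][k] = dp[i][j][k - 1]
--
-- 	# If there is solution exist.
-- 	if (dp[m][n][n] == -1):
-- 		return 0
--
-- 	else:
-- 		return dp[m][n][n]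
-- ===== SOURCE B (Python) =====
-- def find(m, n, adj):
--     # Min-cost exact-weight coin change, layered by coin count: coin k
--     # (1 <= k <= m) weighs k and costs adj[k-1]; only positive-cost coins are
--     # usable; row[j] = min cost of total weight j using at most c coins.
--     coins = [(k, adj[k - 1]) for k in range(1, m + 1) if k <= n and adj[k - 1] > 0]
--     row = [0] + [None] * n
--     for _ in range(m):
--         nxt = [0] + [None] * n
--         for w, c in coins:
--             for j in range(w, n + 1):
--                 p = row[j - w]
--                 if p is not None:
--                     v = p + c
--                     if nxt[j] is None or v < nxt[j]:
--                         nxt[j] = v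
--         row = nxt
--     r = row[n]
--     return 0 if r is None else r
-- ===== Notes on version B (the rewrite author's own statement) =====
-- stated objective: alternative
-- what changed: Replaces A's 3D prefix-of-items DP (state = items considered, count, weight, peeling per-item multiplicities via dp[i-1][j-k][k]) by layered min-cost coin change: a coin list built once, a single 1D weight row per coin-count layer, each layer relaxing every coin once (nxt[j] = min over coins of row[j-w]+cost), None instead of the -1 sentinel.
import Mathlib
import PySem

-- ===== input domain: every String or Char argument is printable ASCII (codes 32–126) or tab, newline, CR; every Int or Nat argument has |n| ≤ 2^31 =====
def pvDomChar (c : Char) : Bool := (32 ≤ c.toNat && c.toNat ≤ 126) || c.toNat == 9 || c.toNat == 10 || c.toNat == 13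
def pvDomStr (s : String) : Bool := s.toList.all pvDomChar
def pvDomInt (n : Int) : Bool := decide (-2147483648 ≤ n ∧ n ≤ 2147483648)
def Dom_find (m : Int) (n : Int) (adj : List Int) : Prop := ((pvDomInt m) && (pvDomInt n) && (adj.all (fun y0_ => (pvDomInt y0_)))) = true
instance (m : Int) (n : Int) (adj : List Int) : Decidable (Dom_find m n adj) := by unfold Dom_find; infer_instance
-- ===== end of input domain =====

-- B replaces A's 3D prefix-of-items DP by layered min-cost coin change over a single
-- 1D weight row (coin list built once, one relaxation pass per coin-count layer);
-- same return value on every input admitted by Pre_find.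

-- ===== PORT A =====
-- A's Python lists are ported as Lean lists.  Reads go through PySem.List.pyGet?
-- (Python-exact, including the final dp[m] read that wraps for -(n+1) <= m < 0, the
-- only negative index A's loops produce); `.getD` supplies a default that is never
-- used inside Pre_find, where every access is in range.  Writes use set/modify at
-- the loop indices, which are nonnegative.
def get1 (s : List Int) (i : Int) : Int := (PySem.List.pyGet? s i).getD 0

def set1 (s : List Int) (i v : Int) : List Int := s.set i.toNat v

def get3 (dp : List (List (List Int))) (i j k : Int) : Int :=
  (PySem.List.pyGet? ((PySem.List.pyGet? ((PySem.List.pyGet? dp i).getD []) j).getD []) k).getD 0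

def set3 (dp : List (List (List Int))) (i j k v : Int) : List (List (List Int)) :=
  dp.modify i.toNat (fun p => p.modify j.toNat (fun q => q.set k.toNat v))

-- body of the innermost `for k in range(1, n+1)` of A's main loop
def stepK (sweet : List Int) (i j : Int) (dp : List (List (List Int))) (k : Int) :
    List (List (List Int)) :=
  let dp := set3 dp i j k (-1)
  let dp := if 0 < i ∧ k ≤ j ∧ 0 < get1 sweet k ∧ get3 dp (i-1) (j-k) k ≠ -1
            then set3 dp i j k (get3 dp (i-1) (j-k) k + get1 sweet k) else dp
  if get3 dp i j k = -1 ∨ (get3 dp i j (k-1) ≠ -1 ∧ get3 dp i j (k-1) < get3 dp i j k)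
  then set3 dp i j k (get3 dp i j (k-1)) else dp

-- `for j in range(1, n+1)` of A's main loop
def stepJ (sweet : List Int) (n i : Int) (dp : List (List (List Int))) (j : Int) :
    List (List (List Int)) :=
  (PySem.List.pyRange 1 (n+1) 1).foldl (stepK sweet i j) dp

-- `for i in range(m+1)` body of A's main loop
def stepI (sweet : List Int) (n : Int) (dp : List (List (List Int))) (i : Int) :
    List (List (List Int)) :=
  (PySem.List.pyRange 1 (n+1) 1).foldl (stepJ sweet n i) dp

-- A's base-case loop body (one i): dp[i][0][k] = 0 for k in 0..n, dp[i][k][0] = -1 for k in 1..n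
def baseI (n : Int) (dp : List (List (List Int))) (i : Int) : List (List (List Int)) :=
  let dp := (PySem.List.pyRange 0 (n+1) 1).foldl (fun dp k => set3 dp i 0 k 0) dp
  (PySem.List.pyRange 1 (n+1) 1).foldl (fun dp k => set3 dp i k 0 (-1)) dp

def find (m : Int) (n : Int) (adj : List Int) : Int :=
  -- sweet = [0]*(n+1); sweet[0] = 0; for i in range(1, m+1): sweet[i] = adj[i-1]
  let sweet := (PySem.List.pyRange 1 (m+1) 1).foldl
    (fun s i => set1 s i (get1 adj (i-1))) (set1 (List.replicate (n+1).toNat 0) 0 0)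
  let dp0 := List.replicate (n+1).toNat
    (List.replicate (n+1).toNat (List.replicate (n+1).toNat (0 : Int)))
  let dp1 := (PySem.List.pyRange 0 (m+1) 1).foldl (baseI n) dp0
  let dp := (PySem.List.pyRange 0 (m+1) 1).foldl (stepI sweet n) dp1
  if get3 dp m n n = -1 then 0 else get3 dp m n n

-- ===== PORT B =====
-- B's Python row is a 1D list of Optional ints (`None` = impossible); reads use
-- PySem.List.pyGet? (every index B uses inside Pre_find is in range), writes List.set.
def getR (row : List (Option Int)) (i : Int) : Option Int :=
  (PySem.List.pyGet? row i).getD none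

def setR (row : List (Option Int)) (i : Int) (v : Option Int) : List (Option Int) :=
  row.set i.toNat v

-- body of B's innermost `for j in range(w, n+1)`
def relaxJ (row : List (Option Int)) (w c : Int) (nxt : List (Option Int)) (j : Int) :
    List (Option Int) :=
  match getR row (j - w) with
  | none => nxt
  | some p =>
    let v := p + c
    match getR nxt j with
    | none => setR nxt j (some v)
    | some q => if v < q then setR nxt j (some v) else nxt

-- one coin (w, c): `for j in range(w, n+1)`
def relaxCoin (row : List (Option Int)) (n : Int) (nxt : List (Option Int))
    (wc : Int × Int) : List (Option Int) :=
  (PySem.List.pyRange wc.1 (n+1) 1).foldl (relaxJ row wc.1 wc.2) nxt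

-- one outer pass: fresh nxt = [0] + [None]*n, then fold over the coins
def passB (coins : List (Int × Int)) (n : Int) (row : List (Option Int)) (_i : Int) :
    List (Option Int) :=
  coins.foldl (relaxCoin row n) (some 0 :: List.replicate n.toNat none)

def find_alt (m : Int) (n : Int) (adj : List Int) : Int :=
  -- coins = [(k, adj[k-1]) for k in range(1, m+1) if k <= n and adj[k-1] > 0]
  let coins := ((PySem.List.pyRange 1 (m+1) 1).filter
      (fun k => decide (k ≤ n) && decide (0 < get1 adj (k-1)))).map
    (fun k => (k, get1 adj (k-1)))
  let row := (PySem.List.pyRange 0 m 1).foldl (passB coins n)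
    (some 0 :: List.replicate n.toNat none)
  match getR row n with
  | none => 0
  | some v => v

-- ===== PRECONDITION & SPEC =====
-- Pre_find excludes exactly the inputs on which A raises IndexError: n < 0 (sweet[0] on an
-- empty list), m > n or m > len(adj) (the sweet-filling loop overruns), and m < -(n+1)
-- (the final dp[m] read).  A is total on everything else, including -(n+1) ≤ m < 0.
def Pre_find (m : Int) (n : Int) (adj : List Int) : Prop :=
  0 ≤ n ∧ m ≤ n ∧ -(n+1) ≤ m ∧ (0 < m → m ≤ (adj.length : Int))
instance (m : Int) (n : Int) (adj : List Int) : Decidable (Pre_find m n adj) := by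
  unfold Pre_find; infer_instance

def pvWitness_find : Int × Int × List Int := (2, 3, [1, 2])

def Spec_find (m : Int) (n : Int) (adj : List Int) (out : Int) : Prop := out = find_alt m n adj
instance (m : Int) (n : Int) (adj : List Int) (out : Int) : Decidable (Spec_find m n adj out) := by
  unfold Spec_find; infer_instance

-- ===== CLAIM (what is proved, stated in full; the proofs are below) =====
def Claim_equal_find : Prop := ∀ (m : Int) (n : Int) (adj : List Int),
  Dom_find m n adj → Pre_find m n adj → Spec_find m n adj (find m n adj)

-- ===== LEMMAS AND PROOFS =====

-- The recurrence A computes: FF sw i j k = minimum total sweetness of a pick of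
-- at most i items with item indices in 1..k (only indices with sw > 0 usable, item t has
-- weight t) whose weights sum to exactly j; none = impossible.
def FF (sw : Int → Int) (i j k : Int) : Option Int :=
  if j = 0 then some 0
  else if i ≤ 0 ∨ k ≤ 0 then none
  else
    let r := FF sw i j (k-1)
    if k ≤ j ∧ 0 < sw k then
      match FF sw (i-1) (j-k) k with
      | some s =>
        match r with
        | none => some (s + sw k)
        | some rv => some (min (s + sw k) rv)
      | none => r
    else r
termination_by (i.toNat, k.toNat)
decreasing_by
  · exact Prod.Lex.right _ (by omega)
  · exact Prod.Lex.left _ _ (by omega)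

-- A's sentinel encoding of FF's Option
def enc (o : Option Int) : Int := match o with | none => -1 | some v => v

-- A's sweetness table as a function: sweet[k] = adj[k-1] for 1 ≤ k ≤ m, else 0
def swF (m : Int) (adj : List Int) : Int → Int :=
  fun k => if 1 ≤ k ∧ k ≤ m then (PySem.List.pyGet? adj (k-1)).getD 0 else 0

-- the ideal table A fills
def EE (m : Int) (adj : List Int) (i j k : Int) : Int := enc (FF (swF m adj) i j k)

theorem FF_j_zero (sw : Int → Int) (i k : Int) : FF sw i 0 k = some 0 := by
  rw [FF]; simp

theorem FF_i_nonpos (sw : Int → Int) (i j k : Int) (hj : j ≠ 0) (hi : i ≤ 0) :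
    FF sw i j k = none := by
  rw [FF]; simp [hj, hi]

theorem FF_k_nonpos (sw : Int → Int) (i j k : Int) (hj : j ≠ 0) (hk : k ≤ 0) :
    FF sw i j k = none := by
  rw [FF]; simp [hj, hk]

theorem FF_nonneg_aux (sw : Int → Int) :
    ∀ (N : Nat) (i j k : Int), i.toNat + k.toNat ≤ N →
      ∀ v, FF sw i j k = some v → 0 ≤ v := by
  intro N
  induction N with
  | zero =>
    intro i j k hN v h
    rw [FF] at h
    by_cases hj : j = 0
    · simp [hj] at h; omega
    · have hik : i ≤ 0 ∨ k ≤ 0 := by omega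
      simp [hj, hik] at h
  | succ N ih =>
    intro i j k hN v h
    rw [FF] at h
    by_cases hj : j = 0
    · simp [hj] at h; omega
    · by_cases hik : i ≤ 0 ∨ k ≤ 0
      · simp [hj, hik] at h
      · simp only [if_neg hj, if_neg hik] at h
        rw [not_or] at hik; obtain ⟨hi0, hk0⟩ := hik
        rw [not_le] at hi0 hk0
        by_cases hc : k ≤ j ∧ 0 < sw k
        · rw [if_pos hc] at h
          cases hrec : FF sw (i-1) (j-k) k with
          | none =>
            rw [hrec] at h
            exact ih i j (k-1) (by omega) v h
          | some s =>
            have hs : 0 ≤ s := ih (i-1) (j-k) k (by omega) s hrec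
            rw [hrec] at h
            cases hr : FF sw i j (k-1) with
            | none => rw [hr] at h; simp at h; omega
            | some rv =>
              have hrv : 0 ≤ rv := ih i j (k-1) (by omega) rv hr
              rw [hr] at h; simp at h
              omega
        · rw [if_neg hc] at h
          exact ih i j (k-1) (by omega) v h

theorem FF_nonneg (sw : Int → Int) (i j k : Int) :
    ∀ v, FF sw i j k = some v → 0 ≤ v :=
  FF_nonneg_aux sw (i.toNat + k.toNat) i j k (le_refl _)

-- items above index m are unusable (sw vanishes there), so the k-bound caps at m
theorem FF_cap (sw : Int → Int) (m : Int) (hm : 0 ≤ m)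
    (hsw : ∀ x, m < x → sw x = 0) :
    ∀ (d : Nat) (i j k : Int), k = m + d → FF sw i j k = FF sw i j m := by
  intro d
  induction d with
  | zero => intro i j k hk; rw [show k = m by omega]
  | succ d ih =>
    intro i j k hk
    by_cases hj : j = 0
    · rw [hj, FF_j_zero, FF_j_zero]
    · by_cases hi : i ≤ 0
      · rw [FF_i_nonpos sw i j k hj hi, FF_i_nonpos sw i j m hj hi]
      · have hknp : ¬ (i ≤ 0 ∨ k ≤ 0) := by omega
        rw [FF]
        simp only [if_neg hj, if_neg hknp]
        rw [if_neg (by rw [hsw k (by omega)]; simp)]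
        exact ih i j (k-1) (by omega)

-- ---------- list-table access bridges (A side) ----------

theorem get1_eq (s : List Int) (x : Int) (hx : 0 ≤ x) :
    get1 s x = (s[x.toNat]?).getD 0 := by
  rw [get1, PySem.List.pyGet?_of_nonneg _ hx]

theorem get3_eq (dp : List (List (List Int))) (i j k : Int)
    (hi : 0 ≤ i) (hj : 0 ≤ j) (hk : 0 ≤ k) :
    get3 dp i j k = ((((dp[i.toNat]?).getD [])[j.toNat]?).getD [])[k.toNat]?.getD 0 := by
  rw [get3, PySem.List.pyGet?_of_nonneg _ hi, PySem.List.pyGet?_of_nonneg _ hj,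
      PySem.List.pyGet?_of_nonneg _ hk]

-- shape of A's table: N rows of N rows of N entries
def Sh3 (N : Nat) (dp : List (List (List Int))) : Prop :=
  dp.length = N ∧ ∀ (a : Nat) p, dp[a]? = some p →
    p.length = N ∧ ∀ (b : Nat) q, p[b]? = some q → q.length = N

theorem Sh3_set3 {N : Nat} {dp : List (List (List Int))} (h : Sh3 N dp)
    (i j k v : Int) : Sh3 N (set3 dp i j k v) := by
  obtain ⟨h1, h2⟩ := h
  constructor
  · simp [set3, h1]
  · intro a p hp
    rw [set3, List.getElem?_modify] at hp
    cases hdp : dp[a]? with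
    | none => rw [hdp] at hp; simp at hp
    | some p0 =>
      rw [hdp] at hp; simp at hp
      obtain ⟨hp0, _⟩ := h2 a p0 hdp
      by_cases hia : i.toNat = a
      · rw [if_pos hia] at hp
        subst hp
        refine ⟨by simp [hp0], ?_⟩
        intro b q hq
        rw [List.getElem?_modify] at hq
        cases hq0 : p0[b]? with
        | none => rw [hq0] at hq; simp at hq
        | some q0 =>
          rw [hq0] at hq; simp at hq
          have hlen := (h2 a p0 hdp).2 b q0 hq0
          by_cases hjb : j.toNat = b
          · rw [if_pos hjb] at hq; subst hq; simp [hlen]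
          · rw [if_neg hjb] at hq; subst hq; exact hlen
      · rw [if_neg hia] at hp
        subst hp
        exact h2 a p0 hdp

theorem get3_set3_self {N : Nat} (dp : List (List (List Int))) (hSh : Sh3 N dp)
    (i j k v : Int) (hi : 0 ≤ i) (hj : 0 ≤ j) (hk : 0 ≤ k)
    (hiN : i.toNat < N) (hjN : j.toNat < N) (hkN : k.toNat < N) :
    get3 (set3 dp i j k v) i j k = v := by
  obtain ⟨h1, h2⟩ := hSh
  rw [get3_eq _ _ _ _ hi hj hk, set3, List.getElem?_modify]
  have hlt : i.toNat < dp.length := by omega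
  cases hdp : dp[i.toNat]? with
  | none => rw [List.getElem?_eq_none_iff] at hdp; omega
  | some p =>
    obtain ⟨hp, h3⟩ := h2 _ _ hdp
    simp only [hdp, Option.map_eq_map, Option.map_some, if_true, Option.getD_some]
    rw [List.getElem?_modify]
    cases hq : p[j.toNat]? with
    | none => rw [List.getElem?_eq_none_iff] at hq; omega
    | some q =>
      have hqlen := h3 _ _ hq
      simp only [hq, Option.map_some, if_true, Option.getD_some]
      simp only [Option.map_eq_map, Option.map_some, Option.getD_some]
      rw [List.getElem?_set]
      simp [hqlen, hkN]

theorem get3_set3_ne (dp : List (List (List Int))) (i j k v x y z : Int)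
    (hi : 0 ≤ i) (hj : 0 ≤ j) (hk : 0 ≤ k) (hx : 0 ≤ x) (hy : 0 ≤ y) (hz : 0 ≤ z)
    (hne : ¬(x = i ∧ y = j ∧ z = k)) :
    get3 (set3 dp i j k v) x y z = get3 dp x y z := by
  rw [get3_eq _ _ _ _ hx hy hz, get3_eq _ _ _ _ hx hy hz, set3, List.getElem?_modify]
  by_cases hxi : i.toNat = x.toNat
  · have hxi' : x = i := by omega
    cases hdp : dp[x.toNat]? with
    | none => simp [hxi, hdp]
    | some p =>
      simp only [hdp, Option.map_eq_map, Option.map_some, hxi, if_true, Option.getD_some]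
      rw [List.getElem?_modify]
      by_cases hyj : j.toNat = y.toNat
      · have hyj' : y = j := by omega
        cases hq : p[y.toNat]? with
        | none => simp [hyj, hq]
        | some q =>
          simp only [hq, Option.map_some, hyj, if_true, Option.getD_some]
          simp only [Option.map_eq_map, Option.map_some, Option.getD_some]
          rw [List.getElem?_set]
          have hzk : ¬ k.toNat = z.toNat := by omega
          simp [hzk]
      · cases hq : p[y.toNat]? with
        | none => simp [hq]
        | some q => simp [hq, hyj]
  · cases hdp : dp[x.toNat]? with
    | none => simp [hdp, hxi]
    | some p => simp [hdp, hxi]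

-- all-zero initial table reads 0 at every index (even Python's wrapped negative ones)
theorem get3_rep (n : Int) (x y z : Int) :
    get3 (List.replicate (n+1).toNat
      (List.replicate (n+1).toNat (List.replicate (n+1).toNat (0 : Int)))) x y z = 0 := by
  rw [get3]
  cases h1 : PySem.List.pyGet? (List.replicate (n+1).toNat
      (List.replicate (n+1).toNat (List.replicate (n+1).toNat (0 : Int)))) x with
  | none => simp [PySem.List.pyGet?]
  | some p =>
    have hp := PySem.List.mem_of_pyGet?_eq_some _ h1
    rw [List.eq_of_mem_replicate hp]
    simp only [Option.getD_some]
    cases h2 : PySem.List.pyGet? (List.replicate (n+1).toNat (List.replicate (n+1).toNat (0:Int))) y with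
    | none => simp [PySem.List.pyGet?]
    | some q =>
      have hq := PySem.List.mem_of_pyGet?_eq_some _ h2
      rw [List.eq_of_mem_replicate hq]
      simp only [Option.getD_some]
      cases h3 : PySem.List.pyGet? (List.replicate (n+1).toNat (0:Int)) z with
      | none => simp
      | some w =>
        rw [List.eq_of_mem_replicate (PySem.List.mem_of_pyGet?_eq_some _ h3)]
        simp

theorem Sh3_rep (n : Int) :
    Sh3 (n+1).toNat (List.replicate (n+1).toNat
      (List.replicate (n+1).toNat (List.replicate (n+1).toNat (0 : Int)))) := by
  refine ⟨by simp, ?_⟩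
  intro a p hp
  rw [List.getElem?_replicate] at hp
  by_cases ha : a < (n+1).toNat
  · rw [if_pos ha] at hp
    cases hp
    refine ⟨by simp, ?_⟩
    intro b q hq
    rw [List.getElem?_replicate] at hq
    by_cases hb : b < (n+1).toNat
    · rw [if_pos hb] at hq; cases hq; simp
    · rw [if_neg hb] at hq; cases hq
  · rw [if_neg ha] at hp; cases hp

theorem get3_set3_char {N : Nat} (dp : List (List (List Int))) (hSh : Sh3 N dp)
    (i j k v : Int) (hi : 0 ≤ i) (hj : 0 ≤ j) (hk : 0 ≤ k)
    (hiN : i.toNat < N) (hjN : j.toNat < N) (hkN : k.toNat < N) :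
    ∀ x y z : Int, 0 ≤ x → 0 ≤ y → 0 ≤ z →
      get3 (set3 dp i j k v) x y z
        = if x = i ∧ y = j ∧ z = k then v else get3 dp x y z := by
  intro x y z hx hy hz
  by_cases h : x = i ∧ y = j ∧ z = k
  · rw [if_pos h, h.1, h.2.1, h.2.2]
    exact get3_set3_self dp hSh i j k v hi hj hk hiN hjN hkN
  · rw [if_neg h]
    exact get3_set3_ne dp i j k v x y z hi hj hk hx hy hz h

theorem EE_j0 (m : Int) (adj : List Int) (i k : Int) : EE m adj i 0 k = 0 := by
  rw [EE, FF_j_zero]; rfl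

theorem EE_k0 (m : Int) (adj : List Int) (i j : Int) (hj : j ≠ 0) :
    EE m adj i j 0 = -1 := by
  rw [EE, FF_k_nonpos _ _ _ _ hj le_rfl]; rfl

-- ---------- A's main-loop cell: one execution of the innermost body ----------

theorem stepK_cell (m n : Int) (adj : List Int) (hn : 0 ≤ n) (hmn : m ≤ n)
    (sweet : List Int) (hsw : ∀ x : Int, 0 ≤ x → get1 sweet x = swF m adj x)
    (i j k : Int) (hi0 : 0 ≤ i) (hj1 : 1 ≤ j) (hjn : j ≤ n) (hk1 : 1 ≤ k) (hkn : k ≤ n)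
    (hin : i ≤ n)
    (dp : List (List (List Int))) (hSh : Sh3 (n+1).toNat dp)
    (hprev : 0 < i → k ≤ j → get3 dp (i-1) (j-k) k = EE m adj (i-1) (j-k) k)
    (hleft : get3 dp i j (k-1) = EE m adj i j (k-1)) :
    Sh3 (n+1).toNat (stepK sweet i j dp k) ∧
    ∀ x y z : Int, 0 ≤ x → 0 ≤ y → 0 ≤ z →
      get3 (stepK sweet i j dp k) x y z
        = if x = i ∧ y = j ∧ z = k then EE m adj i j k else get3 dp x y z := by
  have hiN : i.toNat < (n+1).toNat := by omega
  have hjN : j.toNat < (n+1).toNat := by omega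
  have hkN : k.toNat < (n+1).toNat := by omega
  have hd1Sh : Sh3 (n+1).toNat (set3 dp i j k (-1)) := Sh3_set3 hSh i j k (-1)
  have hd1c := get3_set3_char dp hSh i j k (-1) hi0 (by omega) (by omega) hiN hjN hkN
  have hjne : j ≠ 0 := by omega
  simp only [stepK]
  by_cases hguard : 0 < i ∧ k ≤ j
  · obtain ⟨hipos, hkj⟩ := hguard
    have hrd1 : get3 (set3 dp i j k (-1)) (i-1) (j-k) k = EE m adj (i-1) (j-k) k := by
      rw [hd1c (i-1) (j-k) k (by omega) (by omega) (by omega), if_neg (by omega)]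
      exact hprev hipos hkj
    have hswk : get1 sweet k = swF m adj k := hsw k (by omega)
    by_cases hpos : 0 < swF m adj k
    · cases hrec : FF (swF m adj) (i-1) (j-k) k with
      | none =>
        have hC : ¬ (0 < i ∧ k ≤ j ∧ 0 < get1 sweet k ∧
            get3 (set3 dp i j k (-1)) (i-1) (j-k) k ≠ -1) := by
          intro h
          exact h.2.2.2 (by rw [hrd1, EE, hrec]; rfl)
        rw [if_neg hC]
        have hcell : get3 (set3 dp i j k (-1)) i j k = -1 :=
          get3_set3_self dp hSh i j k (-1) hi0 (by omega) (by omega) hiN hjN hkN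
        rw [if_pos (Or.inl hcell)]
        have hl : get3 (set3 dp i j k (-1)) i j (k-1) = EE m adj i j (k-1) := by
          rw [hd1c i j (k-1) hi0 (by omega) (by omega), if_neg (by omega)]; exact hleft
        rw [hl]
        have hEE : EE m adj i j k = EE m adj i j (k-1) := by
          rw [EE, EE]; congr 1
          rw [FF]
          rw [if_neg hjne, if_neg (by omega : ¬ (i ≤ 0 ∨ k ≤ 0)), if_pos ⟨hkj, hpos⟩, hrec]
        constructor
        · exact Sh3_set3 hd1Sh i j k _
        · intro x y z hx hy hz
          rw [get3_set3_char _ hd1Sh i j k _ hi0 (by omega) (by omega) hiN hjN hkN x y z hx hy hz,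
              hd1c x y z hx hy hz, hEE]
          split_ifs with h1 h2 <;> first | rfl | omega
      | some sv =>
        have hsv : 0 ≤ sv := FF_nonneg _ _ _ _ _ hrec
        have hC : (0 < i ∧ k ≤ j ∧ 0 < get1 sweet k ∧
            get3 (set3 dp i j k (-1)) (i-1) (j-k) k ≠ -1) := by
          refine ⟨hipos, hkj, by rw [hswk]; exact hpos, ?_⟩
          rw [hrd1, EE, hrec]; simp only [enc]; omega
        rw [if_pos hC, hrd1]
        have hcv : EE m adj (i-1) (j-k) k + get1 sweet k = sv + swF m adj k := by
          rw [EE, hrec, hswk]; rfl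
        rw [hcv]
        set c := sv + swF m adj k with hc
        have hcpos : 0 < c := by omega
        have hd2Sh : Sh3 (n+1).toNat (set3 (set3 dp i j k (-1)) i j k c) :=
          Sh3_set3 hd1Sh i j k c
        have hd2c := get3_set3_char _ hd1Sh i j k c hi0 (by omega) (by omega) hiN hjN hkN
        have hcell2 : get3 (set3 (set3 dp i j k (-1)) i j k c) i j k = c := by
          rw [hd2c i j k hi0 (by omega) (by omega), if_pos ⟨rfl, rfl, rfl⟩]
        have hl2 : get3 (set3 (set3 dp i j k (-1)) i j k c) i j (k-1) = EE m adj i j (k-1) := by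
          rw [hd2c i j (k-1) hi0 (by omega) (by omega), if_neg (by omega),
              hd1c i j (k-1) hi0 (by omega) (by omega), if_neg (by omega)]
          exact hleft
        have hFFk : FF (swF m adj) i j k =
            (match FF (swF m adj) i j (k-1) with
             | none => some c
             | some rv => some (min c rv)) := by
          rw [FF]
          rw [if_neg hjne, if_neg (by omega : ¬ (i ≤ 0 ∨ k ≤ 0)), if_pos ⟨hkj, hpos⟩, hrec]
        cases hr : FF (swF m adj) i j (k-1) with
        | none =>
          have hlv : EE m adj i j (k-1) = -1 := by rw [EE, hr]; rfl
          have hC2 : ¬ (get3 (set3 (set3 dp i j k (-1)) i j k c) i j k = -1 ∨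
              (get3 (set3 (set3 dp i j k (-1)) i j k c) i j (k-1) ≠ -1 ∧
               get3 (set3 (set3 dp i j k (-1)) i j k c) i j (k-1) <
                 get3 (set3 (set3 dp i j k (-1)) i j k c) i j k)) := by
            rw [hcell2, hl2, hlv]; omega
          rw [if_neg hC2]
          have hEE : EE m adj i j k = c := by rw [EE, hFFk, hr]; rfl
          refine ⟨hd2Sh, ?_⟩
          intro x y z hx hy hz
          rw [hd2c x y z hx hy hz, hd1c x y z hx hy hz, hEE]
          split_ifs with h1 h2 <;> first | rfl | omega
        | some rv =>
          have hrv : 0 ≤ rv := FF_nonneg _ _ _ _ _ hr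
          have hlv : EE m adj i j (k-1) = rv := by rw [EE, hr]; rfl
          by_cases hlt : rv < c
          · have hC2 : (get3 (set3 (set3 dp i j k (-1)) i j k c) i j k = -1 ∨
                (get3 (set3 (set3 dp i j k (-1)) i j k c) i j (k-1) ≠ -1 ∧
                 get3 (set3 (set3 dp i j k (-1)) i j k c) i j (k-1) <
                   get3 (set3 (set3 dp i j k (-1)) i j k c) i j k)) := by
              rw [hcell2, hl2, hlv]; omega
            rw [if_pos hC2, hl2, hlv]
            have hEE : EE m adj i j k = rv := by
              rw [EE, hFFk, hr]
              simp only [enc]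
              omega
            refine ⟨Sh3_set3 hd2Sh i j k rv, ?_⟩
            intro x y z hx hy hz
            rw [get3_set3_char _ hd2Sh i j k rv hi0 (by omega) (by omega) hiN hjN hkN x y z hx hy hz,
                hd2c x y z hx hy hz, hd1c x y z hx hy hz, hEE]
            split_ifs with h1 h2 h3 <;> first | rfl | omega
          · have hC2 : ¬ (get3 (set3 (set3 dp i j k (-1)) i j k c) i j k = -1 ∨
                (get3 (set3 (set3 dp i j k (-1)) i j k c) i j (k-1) ≠ -1 ∧
                 get3 (set3 (set3 dp i j k (-1)) i j k c) i j (k-1) <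
                   get3 (set3 (set3 dp i j k (-1)) i j k c) i j k)) := by
              rw [hcell2, hl2, hlv]; omega
            rw [if_neg hC2]
            have hEE : EE m adj i j k = c := by
              rw [EE, hFFk, hr]
              simp only [enc]
              omega
            refine ⟨hd2Sh, ?_⟩
            intro x y z hx hy hz
            rw [hd2c x y z hx hy hz, hd1c x y z hx hy hz, hEE]
            split_ifs with h1 h2 <;> first | rfl | omega
    · have hC : ¬ (0 < i ∧ k ≤ j ∧ 0 < get1 sweet k ∧
          get3 (set3 dp i j k (-1)) (i-1) (j-k) k ≠ -1) := by
        intro h; rw [hswk] at h; exact hpos h.2.2.1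
      rw [if_neg hC]
      have hcell : get3 (set3 dp i j k (-1)) i j k = -1 :=
        get3_set3_self dp hSh i j k (-1) hi0 (by omega) (by omega) hiN hjN hkN
      rw [if_pos (Or.inl hcell)]
      have hl : get3 (set3 dp i j k (-1)) i j (k-1) = EE m adj i j (k-1) := by
        rw [hd1c i j (k-1) hi0 (by omega) (by omega), if_neg (by omega)]; exact hleft
      rw [hl]
      have hEE : EE m adj i j k = EE m adj i j (k-1) := by
        rw [EE, EE]; congr 1
        rw [FF]
        rw [if_neg hjne, if_neg (by omega : ¬ (i ≤ 0 ∨ k ≤ 0)),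
            if_neg (by intro h; exact hpos h.2)]
      constructor
      · exact Sh3_set3 hd1Sh i j k _
      · intro x y z hx hy hz
        rw [get3_set3_char _ hd1Sh i j k _ hi0 (by omega) (by omega) hiN hjN hkN x y z hx hy hz,
            hd1c x y z hx hy hz, hEE]
        split_ifs with h1 h2 <;> first | rfl | omega
  · have hC : ¬ (0 < i ∧ k ≤ j ∧ 0 < get1 sweet k ∧
        get3 (set3 dp i j k (-1)) (i-1) (j-k) k ≠ -1) := by
      intro h; exact hguard ⟨h.1, h.2.1⟩
    rw [if_neg hC]
    have hcell : get3 (set3 dp i j k (-1)) i j k = -1 :=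
      get3_set3_self dp hSh i j k (-1) hi0 (by omega) (by omega) hiN hjN hkN
    rw [if_pos (Or.inl hcell)]
    have hl : get3 (set3 dp i j k (-1)) i j (k-1) = EE m adj i j (k-1) := by
      rw [hd1c i j (k-1) hi0 (by omega) (by omega), if_neg (by omega)]; exact hleft
    rw [hl]
    have hEE : EE m adj i j k = EE m adj i j (k-1) := by
      by_cases hip : 0 < i
      · have hkj : ¬ k ≤ j := by omega
        rw [EE, EE]; congr 1
        rw [FF]
        rw [if_neg hjne, if_neg (by omega : ¬ (i ≤ 0 ∨ k ≤ 0)),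
            if_neg (by intro h; exact hkj h.1)]
      · rw [EE, EE, FF_i_nonpos _ _ _ _ hjne (by omega), FF_i_nonpos _ _ _ _ hjne (by omega)]
    constructor
    · exact Sh3_set3 hd1Sh i j k _
    · intro x y z hx hy hz
      rw [get3_set3_char _ hd1Sh i j k _ hi0 (by omega) (by omega) hiN hjN hkN x y z hx hy hz,
          hd1c x y z hx hy hz, hEE]
      split_ifs with h1 h2 <;> first | rfl | omega

-- ---------- A's innermost loop (one row) ----------

theorem stepJ_row (m n : Int) (adj : List Int) (hn : 0 ≤ n) (hmn : m ≤ n)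
    (sweet : List Int) (hsw : ∀ x : Int, 0 ≤ x → get1 sweet x = swF m adj x)
    (i j : Int) (hi0 : 0 ≤ i) (hin : i ≤ n) (hj1 : 1 ≤ j) (hjn : j ≤ n)
    (dp : List (List (List Int))) (hSh : Sh3 (n+1).toNat dp)
    (hprev : ∀ z : Int, 1 ≤ z → z ≤ n → 0 < i → z ≤ j →
      get3 dp (i-1) (j-z) z = EE m adj (i-1) (j-z) z)
    (hbase : get3 dp i j 0 = EE m adj i j 0) :
    ∀ c : Nat, (c : Int) ≤ n →
      Sh3 (n+1).toNat ((PySem.List.pyRange 1 (1 + (c:Int)) 1).foldl (stepK sweet i j) dp) ∧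
      ∀ x y z : Int, 0 ≤ x → 0 ≤ y → 0 ≤ z →
        get3 ((PySem.List.pyRange 1 (1 + (c:Int)) 1).foldl (stepK sweet i j) dp) x y z
          = if x = i ∧ y = j ∧ 1 ≤ z ∧ z ≤ (c : Int) then EE m adj x y z
            else get3 dp x y z := by
  intro c
  induction c with
  | zero =>
    intro _
    rw [show (1 + ((0:Nat):Int)) = 1 by norm_num, PySem.List.pyRange_one_eq_nil (le_refl 1),
        List.foldl_nil]
    refine ⟨hSh, ?_⟩
    intro x y z hx hy hz
    rw [if_neg (by omega)]
  | succ c ih =>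
    intro hc
    obtain ⟨ihSh, ihget⟩ := ih (by push_cast at hc ⊢; omega)
    push_cast
    push_cast at hc
    rw [show (1 + ((c:Int) + 1)) = (1 + (c:Int)) + 1 by ring,
        PySem.List.pyRange_one_succ_right (by omega), List.foldl_append, List.foldl_cons,
        List.foldl_nil]
    set st := (PySem.List.pyRange 1 (1 + (c:Int)) 1).foldl (stepK sweet i j) dp with hst
    have hk1 : (1 : Int) ≤ 1 + (c : Int) := by omega
    have hkn : 1 + (c : Int) ≤ n := by omega
    have hprev' : 0 < i → 1 + (c:Int) ≤ j →
        get3 st (i-1) (j-(1+(c:Int))) (1+(c:Int))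
          = EE m adj (i-1) (j-(1+(c:Int))) (1+(c:Int)) := by
      intro hip hkj
      rw [ihget _ _ _ (by omega) (by omega) (by omega), if_neg (by omega)]
      exact hprev (1+(c:Int)) hk1 hkn hip hkj
    have hleft' : get3 st i j ((1+(c:Int))-1) = EE m adj i j ((1+(c:Int))-1) := by
      have hz : (1:Int) + (c:Int) - 1 = (c:Int) := by ring
      rw [hz, ihget _ _ _ hi0 (by omega) (by omega)]
      by_cases hc1 : 1 ≤ (c:Int)
      · rw [if_pos ⟨rfl, rfl, hc1, le_refl _⟩]
      · rw [if_neg (by omega), show ((c:Int)) = 0 by omega]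
        exact hbase
    obtain ⟨shc, getc⟩ := stepK_cell m n adj hn hmn sweet hsw i j (1+(c:Int)) hi0 hj1 hjn
      hk1 hkn hin st ihSh hprev' hleft'
    refine ⟨shc, ?_⟩
    intro x y z hx hy hz
    rw [getc x y z hx hy hz]
    by_cases hxyz : x = i ∧ y = j ∧ z = 1 + (c:Int)
    · rw [if_pos hxyz, if_pos (by omega), hxyz.1, hxyz.2.1, hxyz.2.2]
    · rw [if_neg hxyz, ihget x y z hx hy hz]
      split_ifs with h1 h2 <;> first | rfl | omega

theorem stepJ_char (m n : Int) (adj : List Int) (hn : 0 ≤ n) (hmn : m ≤ n)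
    (sweet : List Int) (hsw : ∀ x : Int, 0 ≤ x → get1 sweet x = swF m adj x)
    (i j : Int) (hi0 : 0 ≤ i) (hin : i ≤ n) (hj1 : 1 ≤ j) (hjn : j ≤ n)
    (dp : List (List (List Int))) (hSh : Sh3 (n+1).toNat dp)
    (hprev : ∀ z : Int, 1 ≤ z → z ≤ n → 0 < i → z ≤ j →
      get3 dp (i-1) (j-z) z = EE m adj (i-1) (j-z) z)
    (hbase : get3 dp i j 0 = EE m adj i j 0) :
    Sh3 (n+1).toNat (stepJ sweet n i dp j) ∧
    ∀ x y z : Int, 0 ≤ x → 0 ≤ y → 0 ≤ z →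
      get3 (stepJ sweet n i dp j) x y z
        = if x = i ∧ y = j ∧ 1 ≤ z ∧ z ≤ n then EE m adj x y z else get3 dp x y z := by
  have h := stepJ_row m n adj hn hmn sweet hsw i j hi0 hin hj1 hjn dp hSh hprev hbase
    n.toNat (by omega)
  rw [show (1 + ((n.toNat:Nat):Int)) = n + 1 by omega] at h
  rw [show ((n.toNat:Nat):Int) = n by omega] at h
  simp only [stepJ]
  exact h

-- ---------- A's middle loop (one layer) ----------

theorem stepI_row (m n : Int) (adj : List Int) (hn : 0 ≤ n) (hmn : m ≤ n)
    (sweet : List Int) (hsw : ∀ x : Int, 0 ≤ x → get1 sweet x = swF m adj x)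
    (i : Int) (hi0 : 0 ≤ i) (hin : i ≤ n)
    (dp : List (List (List Int))) (hSh : Sh3 (n+1).toNat dp)
    (hprev : ∀ y z : Int, 0 ≤ y → y ≤ n → 1 ≤ z → z ≤ n → 0 < i →
      get3 dp (i-1) y z = EE m adj (i-1) y z)
    (hbase0 : ∀ y : Int, 1 ≤ y → y ≤ n → get3 dp i y 0 = EE m adj i y 0) :
    ∀ c : Nat, (c : Int) ≤ n →
      Sh3 (n+1).toNat ((PySem.List.pyRange 1 (1 + (c:Int)) 1).foldl (stepJ sweet n i) dp) ∧
      ∀ x y z : Int, 0 ≤ x → 0 ≤ y → 0 ≤ z →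
        get3 ((PySem.List.pyRange 1 (1 + (c:Int)) 1).foldl (stepJ sweet n i) dp) x y z
          = if x = i ∧ 1 ≤ y ∧ y ≤ (c:Int) ∧ 1 ≤ z ∧ z ≤ n then EE m adj x y z
            else get3 dp x y z := by
  intro c
  induction c with
  | zero =>
    intro _
    rw [show (1 + ((0:Nat):Int)) = 1 by norm_num, PySem.List.pyRange_one_eq_nil (le_refl 1),
        List.foldl_nil]
    refine ⟨hSh, ?_⟩
    intro x y z hx hy hz
    rw [if_neg (by omega)]
  | succ c ih =>
    intro hc
    obtain ⟨ihSh, ihget⟩ := ih (by push_cast at hc ⊢; omega)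
    push_cast
    push_cast at hc
    rw [show (1 + ((c:Int) + 1)) = (1 + (c:Int)) + 1 by ring,
        PySem.List.pyRange_one_succ_right (by omega), List.foldl_append, List.foldl_cons,
        List.foldl_nil]
    set st := (PySem.List.pyRange 1 (1 + (c:Int)) 1).foldl (stepJ sweet n i) dp with hst
    have hj1 : (1 : Int) ≤ 1 + (c : Int) := by omega
    have hjn : 1 + (c : Int) ≤ n := by omega
    have hprev' : ∀ z : Int, 1 ≤ z → z ≤ n → 0 < i → z ≤ 1 + (c:Int) →
        get3 st (i-1) ((1 + (c:Int))-z) z = EE m adj (i-1) ((1 + (c:Int))-z) z := by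
      intro z hz1 hzn hip hzj
      rw [ihget _ _ _ (by omega) (by omega) (by omega), if_neg (by omega)]
      exact hprev ((1 + (c:Int))-z) z (by omega) (by omega) hz1 hzn hip
    have hbase' : get3 st i (1 + (c:Int)) 0 = EE m adj i (1 + (c:Int)) 0 := by
      rw [ihget _ _ _ hi0 (by omega) (by omega), if_neg (by omega)]
      exact hbase0 (1 + (c:Int)) hj1 hjn
    obtain ⟨shc, getc⟩ := stepJ_char m n adj hn hmn sweet hsw i (1+(c:Int)) hi0 hin hj1 hjn
      st ihSh hprev' hbase'
    refine ⟨shc, ?_⟩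
    intro x y z hx hy hz
    rw [getc x y z hx hy hz]
    by_cases hxyz : x = i ∧ y = 1 + (c:Int) ∧ 1 ≤ z ∧ z ≤ n
    · rw [if_pos hxyz, if_pos (by omega)]
    · rw [if_neg hxyz, ihget x y z hx hy hz]
      split_ifs with h1 h2 <;> first | rfl | omega

theorem stepI_char (m n : Int) (adj : List Int) (hn : 0 ≤ n) (hmn : m ≤ n)
    (sweet : List Int) (hsw : ∀ x : Int, 0 ≤ x → get1 sweet x = swF m adj x)
    (i : Int) (hi0 : 0 ≤ i) (hin : i ≤ n)
    (dp : List (List (List Int))) (hSh : Sh3 (n+1).toNat dp)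
    (hprev : ∀ y z : Int, 0 ≤ y → y ≤ n → 1 ≤ z → z ≤ n → 0 < i →
      get3 dp (i-1) y z = EE m adj (i-1) y z)
    (hbase0 : ∀ y : Int, 1 ≤ y → y ≤ n → get3 dp i y 0 = EE m adj i y 0) :
    Sh3 (n+1).toNat (stepI sweet n dp i) ∧
    ∀ x y z : Int, 0 ≤ x → 0 ≤ y → 0 ≤ z →
      get3 (stepI sweet n dp i) x y z
        = if x = i ∧ 1 ≤ y ∧ y ≤ n ∧ 1 ≤ z ∧ z ≤ n then EE m adj x y z
          else get3 dp x y z := by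
  have h := stepI_row m n adj hn hmn sweet hsw i hi0 hin dp hSh hprev hbase0
    n.toNat (by omega)
  rw [show (1 + ((n.toNat:Nat):Int)) = n + 1 by omega] at h
  rw [show ((n.toNat:Nat):Int) = n by omega] at h
  simp only [stepI]
  exact h

-- ---------- A's outer loop ----------

theorem mainA_loop (m n : Int) (adj : List Int) (hn : 0 ≤ n) (hmn : m ≤ n) (hm : 0 ≤ m)
    (sweet : List Int) (hsw : ∀ x : Int, 0 ≤ x → get1 sweet x = swF m adj x)
    (dp1 : List (List (List Int))) (hSh1 : Sh3 (n+1).toNat dp1)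
    (hbaseE : ∀ x y z : Int, 0 ≤ x → x ≤ m → 0 ≤ y → y ≤ n → 0 ≤ z → z ≤ n →
      (y = 0 ∨ z = 0) → get3 dp1 x y z = EE m adj x y z) :
    ∀ c : Nat, (c : Int) ≤ m + 1 →
      Sh3 (n+1).toNat ((PySem.List.pyRange 0 (c:Int) 1).foldl (stepI sweet n) dp1) ∧
      ∀ x y z : Int, 0 ≤ x → x ≤ m → 0 ≤ y → y ≤ n → 0 ≤ z → z ≤ n →
        (x < (c:Int) ∨ y = 0 ∨ z = 0) →
        get3 ((PySem.List.pyRange 0 (c:Int) 1).foldl (stepI sweet n) dp1) x y z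
          = EE m adj x y z := by
  intro c
  induction c with
  | zero =>
    intro _
    rw [show (((0:Nat)):Int) = 0 by norm_num, PySem.List.pyRange_one_eq_nil (le_refl 0),
        List.foldl_nil]
    refine ⟨hSh1, ?_⟩
    intro x y z hx hxm hy hyn hz hzn hreg
    exact hbaseE x y z hx hxm hy hyn hz hzn (by omega)
  | succ c ih =>
    intro hc
    obtain ⟨ihSh, ihget⟩ := ih (by push_cast at hc ⊢; omega)
    push_cast
    push_cast at hc
    rw [PySem.List.pyRange_one_succ_right (by omega), List.foldl_append, List.foldl_cons,
        List.foldl_nil]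
    set st := (PySem.List.pyRange 0 (c:Int) 1).foldl (stepI sweet n) dp1 with hst
    have hprev' : ∀ y z : Int, 0 ≤ y → y ≤ n → 1 ≤ z → z ≤ n → 0 < (c:Int) →
        get3 st ((c:Int)-1) y z = EE m adj ((c:Int)-1) y z := by
      intro y z hy hyn hz1 hzn hcp
      exact ihget _ _ _ (by omega) (by omega) hy hyn (by omega) hzn (by omega)
    have hbase0' : ∀ y : Int, 1 ≤ y → y ≤ n → get3 st (c:Int) y 0 = EE m adj (c:Int) y 0 := by
      intro y hy1 hyn
      exact ihget _ _ _ (by omega) (by omega) (by omega) hyn (by omega) (by omega) (by omega)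
    obtain ⟨shc, getc⟩ := stepI_char m n adj hn hmn sweet hsw (c:Int) (by omega) (by omega)
      st ihSh hprev' hbase0'
    refine ⟨shc, ?_⟩
    intro x y z hx hxm hy hyn hz hzn hreg
    rw [getc x y z hx hy hz]
    by_cases hxyz : x = (c:Int) ∧ 1 ≤ y ∧ y ≤ n ∧ 1 ≤ z ∧ z ≤ n
    · rw [if_pos hxyz, hxyz.1]
    · rw [if_neg hxyz]
      exact ihget x y z hx hxm hy hyn hz hzn (by omega)

-- ---------- A's base-case loops ----------

theorem baseA1 (n i : Int) (hn : 0 ≤ n) (hi0 : 0 ≤ i) (hin : i ≤ n)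
    (dp : List (List (List Int))) (hSh : Sh3 (n+1).toNat dp) :
    ∀ c : Nat, (c : Int) ≤ n + 1 →
      Sh3 (n+1).toNat ((PySem.List.pyRange 0 (c:Int) 1).foldl (fun d k => set3 d i 0 k 0) dp) ∧
      ∀ x y z : Int, 0 ≤ x → 0 ≤ y → 0 ≤ z →
        get3 ((PySem.List.pyRange 0 (c:Int) 1).foldl (fun d k => set3 d i 0 k 0) dp) x y z
          = if x = i ∧ y = 0 ∧ z < (c:Int) then 0 else get3 dp x y z := by
  intro c
  induction c with
  | zero =>
    intro _
    rw [show (((0:Nat)):Int) = 0 by norm_num, PySem.List.pyRange_one_eq_nil (le_refl 0),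
        List.foldl_nil]
    refine ⟨hSh, ?_⟩
    intro x y z hx hy hz
    rw [if_neg (by omega)]
  | succ c ih =>
    intro hc
    obtain ⟨ihSh, ihget⟩ := ih (by push_cast at hc ⊢; omega)
    push_cast
    push_cast at hc
    rw [PySem.List.pyRange_one_succ_right (by omega), List.foldl_append, List.foldl_cons,
        List.foldl_nil]
    set st := (PySem.List.pyRange 0 (c:Int) 1).foldl (fun d k => set3 d i 0 k 0) dp with hst
    have hchar := get3_set3_char st ihSh i 0 (c:Int) 0 hi0 (by omega) (by omega)
      (by omega) (by omega) (by omega)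
    refine ⟨Sh3_set3 ihSh _ _ _ _, ?_⟩
    intro x y z hx hy hz
    rw [hchar x y z hx hy hz, ihget x y z hx hy hz]
    split_ifs with h1 h2 <;> first | rfl | omega

theorem baseA2 (n i : Int) (hn : 0 ≤ n) (hi0 : 0 ≤ i) (hin : i ≤ n)
    (dp : List (List (List Int))) (hSh : Sh3 (n+1).toNat dp) :
    ∀ c : Nat, (c : Int) ≤ n →
      Sh3 (n+1).toNat ((PySem.List.pyRange 1 (1 + (c:Int)) 1).foldl (fun d k => set3 d i k 0 (-1)) dp) ∧
      ∀ x y z : Int, 0 ≤ x → 0 ≤ y → 0 ≤ z →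
        get3 ((PySem.List.pyRange 1 (1 + (c:Int)) 1).foldl (fun d k => set3 d i k 0 (-1)) dp) x y z
          = if x = i ∧ 1 ≤ y ∧ y ≤ (c:Int) ∧ z = 0 then -1 else get3 dp x y z := by
  intro c
  induction c with
  | zero =>
    intro _
    rw [show (1 + ((0:Nat):Int)) = 1 by norm_num, PySem.List.pyRange_one_eq_nil (le_refl 1),
        List.foldl_nil]
    refine ⟨hSh, ?_⟩
    intro x y z hx hy hz
    rw [if_neg (by omega)]
  | succ c ih =>
    intro hc
    obtain ⟨ihSh, ihget⟩ := ih (by push_cast at hc ⊢; omega)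
    push_cast
    push_cast at hc
    rw [show (1 + ((c:Int) + 1)) = (1 + (c:Int)) + 1 by ring,
        PySem.List.pyRange_one_succ_right (by omega), List.foldl_append, List.foldl_cons,
        List.foldl_nil]
    set st := (PySem.List.pyRange 1 (1 + (c:Int)) 1).foldl (fun d k => set3 d i k 0 (-1)) dp with hst
    have hchar := get3_set3_char st ihSh i (1 + (c:Int)) 0 (-1) hi0 (by omega) (by omega)
      (by omega) (by omega) (by omega)
    refine ⟨Sh3_set3 ihSh _ _ _ _, ?_⟩
    intro x y z hx hy hz
    rw [hchar x y z hx hy hz, ihget x y z hx hy hz]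
    split_ifs with h1 h2 <;> first | rfl | omega

theorem baseI_char (m n i : Int) (hn : 0 ≤ n) (hi0 : 0 ≤ i) (hin : i ≤ n)
    (dp : List (List (List Int))) (hSh : Sh3 (n+1).toNat dp) :
    Sh3 (n+1).toNat (baseI n dp i) ∧
    ∀ x y z : Int, 0 ≤ x → 0 ≤ y → 0 ≤ z →
      get3 (baseI n dp i) x y z
        = if x = i ∧ y = 0 ∧ z ≤ n then 0
          else if x = i ∧ 1 ≤ y ∧ y ≤ n ∧ z = 0 then -1 else get3 dp x y z := by
  have h1 := baseA1 n i hn hi0 hin dp hSh (n+1).toNat (by omega)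
  rw [show (((n+1).toNat:Nat):Int) = n + 1 by omega] at h1
  obtain ⟨sh1, g1⟩ := h1
  have h2 := baseA2 n i hn hi0 hin _ sh1 n.toNat (by omega)
  rw [show (1 + ((n.toNat:Nat):Int)) = n + 1 by omega] at h2
  rw [show ((n.toNat:Nat):Int) = n by omega] at h2
  obtain ⟨sh2, g2⟩ := h2
  simp only [baseI]
  refine ⟨sh2, ?_⟩
  intro x y z hx hy hz
  rw [g2 x y z hx hy hz, g1 x y z hx hy hz]
  split_ifs with h1' h2' h3' <;> first | rfl | omega

theorem dp1_loop (m n : Int) (hn : 0 ≤ n) (hmn : m ≤ n) :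
    ∀ c : Nat, (c : Int) ≤ m + 1 →
      Sh3 (n+1).toNat ((PySem.List.pyRange 0 (c:Int) 1).foldl (baseI n)
        (List.replicate (n+1).toNat (List.replicate (n+1).toNat (List.replicate (n+1).toNat (0:Int))))) ∧
      ∀ x y z : Int, 0 ≤ x → 0 ≤ y → 0 ≤ z →
        get3 ((PySem.List.pyRange 0 (c:Int) 1).foldl (baseI n)
          (List.replicate (n+1).toNat (List.replicate (n+1).toNat (List.replicate (n+1).toNat (0:Int))))) x y z
          = if x < (c:Int) ∧ 1 ≤ y ∧ y ≤ n ∧ z = 0 then -1 else 0 := by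
  intro c
  induction c with
  | zero =>
    intro _
    rw [show (((0:Nat)):Int) = 0 by norm_num, PySem.List.pyRange_one_eq_nil (le_refl 0),
        List.foldl_nil]
    refine ⟨Sh3_rep n, ?_⟩
    intro x y z hx hy hz
    rw [if_neg (by omega), get3_rep]
  | succ c ih =>
    intro hc
    obtain ⟨ihSh, ihget⟩ := ih (by push_cast at hc ⊢; omega)
    push_cast
    push_cast at hc
    rw [PySem.List.pyRange_one_succ_right (by omega), List.foldl_append, List.foldl_cons,
        List.foldl_nil]
    obtain ⟨shc, getc⟩ := baseI_char m n (c:Int) hn (by omega) (by omega) _ ihSh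
    refine ⟨shc, ?_⟩
    intro x y z hx hy hz
    rw [getc x y z hx hy hz, ihget x y z hx hy hz]
    split_ifs with h1 h2 h3 <;> first | rfl | omega

-- ---------- A's sweet list ----------

theorem length_set1 (s : List Int) (i v : Int) : (set1 s i v).length = s.length := by
  simp [set1]

theorem get1_set1_char (s : List Int) (i v : Int) (hi : 0 ≤ i) (hlen : i.toNat < s.length) :
    ∀ x : Int, 0 ≤ x → get1 (set1 s i v) x = if x = i then v else get1 s x := by
  intro x hx
  rw [get1_eq _ _ hx, get1_eq _ _ hx, set1]
  by_cases h : x = i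
  · rw [if_pos h, h, List.getElem?_set, if_pos rfl, if_pos hlen]
    simp
  · rw [if_neg h, List.getElem?_set, if_neg (by omega)]

theorem get1_rep (t : Nat) (x : Int) (hx : 0 ≤ x) :
    get1 (List.replicate t (0:Int)) x = 0 := by
  rw [get1_eq _ _ hx, List.getElem?_replicate]
  split_ifs <;> simp

theorem sweet_loop (m n : Int) (adj : List Int) (hm : 0 ≤ m) (hn : 0 ≤ n) (hmn : m ≤ n) :
    ∀ c : Nat, (c : Int) ≤ m →
      ((PySem.List.pyRange 1 (1 + (c:Int)) 1).foldl (fun s i => set1 s i (get1 adj (i-1)))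
        (set1 (List.replicate (n+1).toNat 0) 0 0)).length = (n+1).toNat ∧
      ∀ x : Int, 0 ≤ x →
        get1 ((PySem.List.pyRange 1 (1 + (c:Int)) 1).foldl (fun s i => set1 s i (get1 adj (i-1)))
          (set1 (List.replicate (n+1).toNat 0) 0 0)) x
          = if 1 ≤ x ∧ x ≤ (c:Int) then get1 adj (x-1) else 0 := by
  intro c
  induction c with
  | zero =>
    intro _
    rw [show (1 + ((0:Nat):Int)) = 1 by norm_num, PySem.List.pyRange_one_eq_nil (le_refl 1),
        List.foldl_nil]
    constructor
    · rw [length_set1]; simp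
    · intro x hx
      rw [if_neg (by omega),
          get1_set1_char _ 0 0 (le_refl 0) (by rw [List.length_replicate]; omega) x hx]
      split_ifs with h
      · rfl
      · exact get1_rep _ x hx
  | succ c ih =>
    intro hc
    obtain ⟨ihlen, ihget⟩ := ih (by push_cast at hc ⊢; omega)
    push_cast
    push_cast at hc
    rw [show (1 + ((c:Int) + 1)) = (1 + (c:Int)) + 1 by ring,
        PySem.List.pyRange_one_succ_right (by omega), List.foldl_append, List.foldl_cons,
        List.foldl_nil]
    set st := (PySem.List.pyRange 1 (1 + (c:Int)) 1).foldl (fun s i => set1 s i (get1 adj (i-1)))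
      (set1 (List.replicate (n+1).toNat 0) 0 0) with hst
    constructor
    · rw [length_set1, ihlen]
    · intro x hx
      rw [get1_set1_char st (1 + (c:Int)) _ (by omega) (by rw [ihlen]; omega) x hx,
          ihget x hx]
      split_ifs with h1 h2 h3 <;> first | rfl | omega | (congr 1; omega)

theorem sweet_char (m n : Int) (adj : List Int) (hm : 0 ≤ m) (hn : 0 ≤ n) (hmn : m ≤ n) :
    ∀ x : Int, 0 ≤ x →
      get1 ((PySem.List.pyRange 1 (m+1) 1).foldl (fun s i => set1 s i (get1 adj (i-1)))
        (set1 (List.replicate (n+1).toNat 0) 0 0)) x = swF m adj x := by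
  have h := sweet_loop m n adj hm hn hmn m.toNat (by omega)
  rw [show (1 + ((m.toNat:Nat):Int)) = m + 1 by omega] at h
  rw [show ((m.toNat:Nat):Int) = m by omega] at h
  intro x hx
  rw [h.2 x hx]
  simp only [swF, get1]

-- ---------- A: the whole program ----------

theorem find_eq (m n : Int) (adj : List Int) (hm : 0 ≤ m) (hn : 0 ≤ n) (hmn : m ≤ n) :
    find m n adj = if EE m adj m n n = -1 then 0 else EE m adj m n n := by
  simp only [find]
  have hsw := sweet_char m n adj hm hn hmn
  have hdp1 := dp1_loop m n hn hmn (m+1).toNat (by omega)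
  rw [show (((m+1).toNat:Nat):Int) = m + 1 by omega] at hdp1
  obtain ⟨hSh1, hg1⟩ := hdp1
  have hbaseE : ∀ x y z : Int, 0 ≤ x → x ≤ m → 0 ≤ y → y ≤ n → 0 ≤ z → z ≤ n →
      (y = 0 ∨ z = 0) →
      get3 ((PySem.List.pyRange 0 (m+1) 1).foldl (baseI n)
        (List.replicate (n+1).toNat (List.replicate (n+1).toNat
          (List.replicate (n+1).toNat (0:Int))))) x y z = EE m adj x y z := by
    intro x y z hx hxm hy hyn hz hzn hor
    rw [hg1 x y z hx hy hz]
    by_cases hy0 : y = 0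
    · rw [if_neg (by omega), hy0, EE_j0]
    · have hz0 : z = 0 := by omega
      rw [if_pos (by omega), hz0, EE_k0 _ _ _ _ (by omega)]
  have hmain := mainA_loop m n adj hn hmn hm _ hsw _ hSh1 hbaseE (m+1).toNat (by omega)
  rw [show (((m+1).toNat:Nat):Int) = m + 1 by omega] at hmain
  rw [hmain.2 m n n hm (le_refl m) hn (le_refl n) hn (le_refl n) (by omega)]

-- ---------- Option-Int min/plus order (B side): none = "impossible" = +infinity ----------

def omin (a b : Option Int) : Option Int :=
  match a, b with
  | none, b => b
  | some u, none => some u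
  | some u, some v => some (min u v)

def oadd (a : Option Int) (c : Int) : Option Int := a.map (· + c)

def ole (a b : Option Int) : Prop :=
  match a, b with
  | _, none => True
  | none, some _ => False
  | some u, some v => u ≤ v

theorem ole_refl (a : Option Int) : ole a a := by cases a <;> simp [ole]

theorem ole_none_right (a : Option Int) : ole a none := by cases a <;> simp [ole]

theorem ole_trans {a b c : Option Int} (h1 : ole a b) (h2 : ole b c) : ole a c := by
  cases a <;> cases b <;> cases c <;> simp_all [ole] <;> omega

theorem ole_antisymm {a b : Option Int} (h1 : ole a b) (h2 : ole b a) : a = b := by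
  cases a <;> cases b <;> simp_all [ole] <;> omega

theorem omin_le_left (a b : Option Int) : ole (omin a b) a := by
  cases a <;> cases b <;> simp [ole, omin]

theorem omin_le_right (a b : Option Int) : ole (omin a b) b := by
  cases a <;> cases b <;> simp [ole, omin]

theorem ole_omin {a x y : Option Int} (h1 : ole a x) (h2 : ole a y) : ole a (omin x y) := by
  cases a <;> cases x <;> cases y <;> simp_all [ole, omin] <;> omega

theorem oadd_mono {a b : Option Int} (c : Int) (h : ole a b) : ole (oadd a c) (oadd b c) := by
  cases a <;> cases b <;> simp_all [ole, oadd]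

-- ---------- order facts about A's recurrence FF ----------

-- shrinking the item cap by one can only lose options
theorem FF_mono_step (sw : Int → Int) (i j k : Int) :
    ole (FF sw i j k) (FF sw i j (k-1)) := by
  by_cases hj : j = 0
  · rw [hj, FF_j_zero, FF_j_zero]; simp [ole]
  · by_cases hi : i ≤ 0
    · rw [FF_i_nonpos sw i j k hj hi, FF_i_nonpos sw i j (k-1) hj hi]; simp [ole]
    · by_cases hk : k ≤ 0
      · rw [FF_k_nonpos sw i j k hj hk, FF_k_nonpos sw i j (k-1) hj (by omega)]
        simp [ole]
      · conv_lhs => rw [FF]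
        simp only [if_neg hj, if_neg (by omega : ¬ (i ≤ 0 ∨ k ≤ 0))]
        by_cases hg : k ≤ j ∧ 0 < sw k
        · rw [if_pos hg]
          cases hrec : FF sw (i-1) (j-k) k with
          | none => exact ole_refl _
          | some s =>
            cases hr : FF sw i j (k-1) with
            | none => simp [ole]
            | some rv => simp [ole]
        · rw [if_neg hg]; exact ole_refl _

theorem FF_mono_le (sw : Int → Int) (i j k k' : Int) (h : k' ≤ k) :
    ole (FF sw i j k) (FF sw i j k') := by
  have H : ∀ (d : Nat) (k : Int), ole (FF sw i j k) (FF sw i j (k - (d:Int))) := by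
    intro d
    induction d with
    | zero => intro k; simpa using ole_refl (FF sw i j k)
    | succ d ih =>
      intro k
      refine ole_trans (ih k) ?_
      rw [show k - (((d+1:Nat)):Int) = (k - (d:Int)) - 1 by push_cast; ring]
      exact FF_mono_step sw i j (k - (d:Int))
  have h2 := H (k - k').toNat k
  rwa [show k - (((k - k').toNat : Nat) : Int) = k' by omega] at h2

-- using one coin of the (usable) top value k is one of FF's options
theorem FF_step_coin (sw : Int → Int) (i j k : Int) (hi : 0 < i) (hk1 : 1 ≤ k)
    (hkj : k ≤ j) (hsw : 0 < sw k) :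
    ole (FF sw i j k) (oadd (FF sw (i-1) (j-k) k) (sw k)) := by
  have hj : j ≠ 0 := by omega
  conv_lhs => rw [FF]
  simp only [if_neg hj, if_neg (by omega : ¬ (i ≤ 0 ∨ k ≤ 0)),
    if_pos (⟨hkj, hsw⟩ : k ≤ j ∧ 0 < sw k)]
  cases hrec : FF sw (i-1) (j-k) k with
  | none => simp [oadd, ole]
  | some s =>
    cases hr : FF sw i j (k-1) with
    | none => simp [oadd, ole]
    | some rv => simp [oadd, ole]

-- exchange lemma: adding ANY usable coin t ≤ k to an (i-1)-coin solution is an option of FF i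
theorem FF_exchange (sw : Int → Int) :
    ∀ (N : Nat) (i j k t : Int), i.toNat + k.toNat ≤ N →
      1 ≤ i → 1 ≤ t → t ≤ k → t ≤ j → 0 < sw t →
      ole (FF sw i j k) (oadd (FF sw (i-1) (j-t) k) (sw t)) := by
  intro N
  induction N with
  | zero => intro i j k t hN hi ht htk htj hsw; omega
  | succ N ih =>
    intro i j k t hN hi ht htk htj hsw
    by_cases hjt : j - t = 0
    · have h2 := FF_step_coin sw i j t (by omega) ht htj hsw
      rw [hjt, FF_j_zero] at h2 ⊢
      exact ole_trans (FF_mono_le sw i j k t htk) h2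
    · by_cases htk' : t = k
      · subst htk'; exact FF_step_coin sw i j t (by omega) ht htj hsw
      · have htk2 : t < k := lt_of_le_of_ne htk htk'
        by_cases hi1 : i - 1 ≤ 0
        · rw [FF_i_nonpos sw (i-1) (j-t) k hjt hi1]
          exact ole_none_right _
        · have hun : FF sw (i-1) (j-t) k =
              (if k ≤ j - t ∧ 0 < sw k then
                match FF sw (i-1-1) (j-t-k) k with
                | some s =>
                  (match FF sw (i-1) (j-t) (k-1) with
                   | none => some (s + sw k)
                   | some rv => some (min (s + sw k) rv))
                | none => FF sw (i-1) (j-t) (k-1)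
              else FF sw (i-1) (j-t) (k-1)) := by
            rw [FF]
            rw [if_neg hjt, if_neg (by omega : ¬ (i - 1 ≤ 0 ∨ k ≤ 0))]
          have hbase : ole (FF sw i j k) (oadd (FF sw (i-1) (j-t) (k-1)) (sw t)) :=
            ole_trans (FF_mono_step sw i j k)
              (ih i j (k-1) t (by omega) hi ht (by omega) htj hsw)
          rw [hun]
          by_cases hg : k ≤ j - t ∧ 0 < sw k
          · rw [if_pos hg]
            cases hin : FF sw (i-1-1) (j-t-k) k with
            | none => exact hbase
            | some s =>
              have c1 := FF_step_coin sw i j k (by omega) (by omega) (by omega) hg.2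
              have c2 := ih (i-1) (j-k) k t (by omega) (by omega) ht htk (by omega) hsw
              rw [show j - k - t = j - t - k by ring, hin] at c2
              have c3 := oadd_mono (sw k) c2
              have hchain : ole (FF sw i j k) (some (s + sw k + sw t)) := by
                refine ole_trans c1 (ole_trans c3 ?_)
                simp only [oadd, Option.map_some, ole]
                omega
              cases hr : FF sw (i-1) (j-t) (k-1) with
              | none =>
                simpa only [oadd, Option.map_some] using hchain
              | some rv =>
                have hrv : ole (FF sw i j k) (some (rv + sw t)) := by
                  have := hbase
                  rw [hr] at this
                  simpa only [oadd, Option.map_some] using this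
                have := ole_omin hchain hrv
                simp only [omin] at this
                simpa only [oadd, Option.map_some,
                  show min (s + sw k + sw t) (rv + sw t) = min (s + sw k) rv + sw t by omega]
                  using this
          · rw [if_neg hg]
            exact hbase

theorem FF_exchange' (sw : Int → Int) (i j k t : Int)
    (hi : 1 ≤ i) (ht : 1 ≤ t) (htk : t ≤ k) (htj : t ≤ j) (hsw : 0 < sw t) :
    ole (FF sw i j k) (oadd (FF sw (i-1) (j-t) k) (sw t)) :=
  FF_exchange sw (i.toNat + k.toNat) i j k t (le_refl _) hi ht htk htj hsw

-- ---------- the omin-fold B's coin pass computes at one weight ----------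

def tval (R : Int → Option Int) (j : Int) (wc : Int × Int) : Option Int :=
  oadd (R (j - wc.1)) wc.2

def bfold (R : Int → Option Int) (j : Int) (cs : List (Int × Int)) (init : Option Int) :
    Option Int :=
  cs.foldl (fun acc wc => if wc.1 ≤ j then omin acc (tval R j wc) else acc) init

theorem bfold_cons (R : Int → Option Int) (j : Int) (wc : Int × Int) (cs : List (Int × Int))
    (init : Option Int) :
    bfold R j (wc :: cs) init
      = bfold R j cs (if wc.1 ≤ j then omin init (tval R j wc) else init) := rfl

theorem bfold_le_init (R : Int → Option Int) (j : Int) :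
    ∀ (cs : List (Int × Int)) (init : Option Int), ole (bfold R j cs init) init := by
  intro cs
  induction cs with
  | nil => intro init; exact ole_refl _
  | cons a cs ih =>
    intro init
    rw [bfold_cons]
    refine ole_trans (ih _) ?_
    split_ifs with h
    · exact omin_le_left _ _
    · exact ole_refl _

theorem bfold_le_mem (R : Int → Option Int) (j : Int) (wc : Int × Int) (hw : wc.1 ≤ j) :
    ∀ (cs : List (Int × Int)) (init : Option Int), wc ∈ cs →
      ole (bfold R j cs init) (tval R j wc) := by
  intro cs
  induction cs with
  | nil => intro init h; cases h
  | cons a cs ih =>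
    intro init h
    rw [bfold_cons]
    rcases List.mem_cons.mp h with h1 | h2
    · subst h1
      rw [if_pos hw]
      exact ole_trans (bfold_le_init R j cs _) (omin_le_right _ _)
    · exact ih _ h2

theorem bfold_lb (R : Int → Option Int) (j : Int) (a : Option Int) :
    ∀ (cs : List (Int × Int)) (init : Option Int),
      (∀ wc ∈ cs, wc.1 ≤ j → ole a (tval R j wc)) → ole a init →
      ole a (bfold R j cs init) := by
  intro cs
  induction cs with
  | nil => intro init _ h2; exact h2
  | cons c cs ih =>
    intro init h1 h2
    rw [bfold_cons]
    refine ih _ (fun wc hwc hwj => h1 wc (List.mem_cons_of_mem _ hwc) hwj) ?_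
    split_ifs with h
    · exact ole_omin h2 (h1 c (List.mem_cons_self ..) h)
    · exact h2

theorem bfold_notouch (R : Int → Option Int) (j : Int) :
    ∀ (cs : List (Int × Int)) (init : Option Int),
      (∀ wc ∈ cs, ¬ wc.1 ≤ j) → bfold R j cs init = init := by
  intro cs
  induction cs with
  | nil => intro init _; rfl
  | cons a cs ih =>
    intro init h
    rw [bfold_cons, if_neg (h a (List.mem_cons_self ..))]
    exact ih _ (fun wc hwc => h wc (List.mem_cons_of_mem _ hwc))

-- ---------- 1D row access (B side) ----------

theorem getR_eq (row : List (Option Int)) (x : Int) (hx : 0 ≤ x) :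
    getR row x = (row[x.toNat]?).getD none := by
  rw [getR, PySem.List.pyGet?_of_nonneg _ hx]

theorem length_setR (row : List (Option Int)) (i : Int) (v : Option Int) :
    (setR row i v).length = row.length := by simp [setR]

theorem getR_setR_char (row : List (Option Int)) (i : Int) (v : Option Int)
    (hi : 0 ≤ i) (hlen : i.toNat < row.length) :
    ∀ x : Int, 0 ≤ x → getR (setR row i v) x = if x = i then v else getR row x := by
  intro x hx
  rw [getR_eq _ _ hx, getR_eq _ _ hx, setR]
  by_cases h : x = i
  · rw [if_pos h, h, List.getElem?_set, if_pos rfl, if_pos hlen]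
    simp
  · rw [if_neg h, List.getElem?_set, if_neg (by omega)]

theorem initRow_get (n x : Int) (hn : 0 ≤ n) (hx : 0 ≤ x) (hxn : x ≤ n) :
    getR (some 0 :: List.replicate n.toNat (none : Option Int)) x
      = if x = 0 then some 0 else none := by
  rw [getR_eq _ _ hx]
  by_cases h : x = 0
  · rw [if_pos h, h]
    rfl
  · rw [if_neg h]
    obtain ⟨t, ht⟩ : ∃ t : Nat, x.toNat = t + 1 := ⟨x.toNat - 1, by omega⟩
    rw [ht, List.getElem?_cons_succ, List.getElem?_replicate, if_pos (by omega)]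
    rfl

-- ---------- B's innermost loop body ----------

theorem relaxJ_char (row : List (Option Int)) (w c n : Int)
    (nxt : List (Option Int)) (hlen : nxt.length = n.toNat + 1)
    (j : Int) (hj0 : 0 ≤ j) (hjn : j ≤ n) :
    (relaxJ row w c nxt j).length = n.toNat + 1 ∧
    ∀ x : Int, 0 ≤ x →
      getR (relaxJ row w c nxt j) x
        = if x = j then omin (getR nxt j) (oadd (getR row (j - w)) c) else getR nxt x := by
  have hjN : j.toNat < n.toNat + 1 := by omega
  cases hp : getR row (j - w) with
  | none =>
    simp only [relaxJ, hp]
    refine ⟨hlen, ?_⟩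
    intro x hx
    by_cases hxj : x = j
    · rw [if_pos hxj, hxj]
      cases getR nxt j <;> simp [omin, oadd]
    · rw [if_neg hxj]
  | some p =>
    cases hq : getR nxt j with
    | none =>
      simp only [relaxJ, hp, hq]
      constructor
      · rw [length_setR]; exact hlen
      · intro x hx
        rw [getR_setR_char nxt j _ hj0 (by omega) x hx]
        by_cases hxj : x = j
        · rw [if_pos hxj, if_pos hxj]
          simp [omin, oadd]
        · rw [if_neg hxj, if_neg hxj]
    | some q =>
      simp only [relaxJ, hp, hq]
      by_cases hlt : p + c < q
      · rw [if_pos hlt]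
        constructor
        · rw [length_setR]; exact hlen
        · intro x hx
          rw [getR_setR_char nxt j _ hj0 (by omega) x hx]
          by_cases hxj : x = j
          · rw [if_pos hxj, if_pos hxj]
            simp only [omin, oadd, Option.map_some, Option.some.injEq]
            omega
          · rw [if_neg hxj, if_neg hxj]
      · rw [if_neg hlt]
        refine ⟨hlen, ?_⟩
        intro x hx
        by_cases hxj : x = j
        · rw [if_pos hxj, hxj, hq]
          simp only [omin, oadd, Option.map_some, Option.some.injEq]
          omega
        · rw [if_neg hxj]

-- ---------- B's per-coin loop ----------

theorem relaxCoin_row (row : List (Option Int)) (w c n : Int) (hw : 1 ≤ w)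
    (nxt : List (Option Int)) (hlen : nxt.length = n.toNat + 1) :
    ∀ d : Nat, w + (d:Int) ≤ n + 1 →
      ((PySem.List.pyRange w (w + (d:Int)) 1).foldl (relaxJ row w c) nxt).length = n.toNat + 1 ∧
      ∀ x : Int, 0 ≤ x →
        getR ((PySem.List.pyRange w (w + (d:Int)) 1).foldl (relaxJ row w c) nxt) x
          = if w ≤ x ∧ x < w + (d:Int) then omin (getR nxt x) (oadd (getR row (x - w)) c)
            else getR nxt x := by
  intro d
  induction d with
  | zero =>
    intro _
    rw [show w + ((0:Nat):Int) = w by norm_num, PySem.List.pyRange_one_eq_nil (le_refl w),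
        List.foldl_nil]
    refine ⟨hlen, ?_⟩
    intro x hx
    rw [if_neg (by omega)]
  | succ d ih =>
    intro hd
    obtain ⟨ihlen, ihget⟩ := ih (by push_cast at hd ⊢; omega)
    push_cast
    push_cast at hd
    rw [show w + ((d:Int) + 1) = (w + (d:Int)) + 1 by ring,
        PySem.List.pyRange_one_succ_right (by omega), List.foldl_append, List.foldl_cons,
        List.foldl_nil]
    set st := (PySem.List.pyRange w (w + (d:Int)) 1).foldl (relaxJ row w c) nxt with hst
    obtain ⟨len2, get2c⟩ := relaxJ_char row w c n st ihlen (w + (d:Int)) (by omega) (by omega)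
    refine ⟨len2, ?_⟩
    intro x hx
    rw [get2c x hx]
    by_cases hxj : x = w + (d:Int)
    · rw [if_pos hxj, if_pos (by omega), hxj,
          ihget (w + (d:Int)) (by omega), if_neg (by omega)]
    · rw [if_neg hxj, ihget x hx]
      split_ifs with h1 h2 <;> first | rfl | omega

theorem relaxCoin_char (row : List (Option Int)) (n : Int) (nxt : List (Option Int))
    (wc : Int × Int) (hw : 1 ≤ wc.1) (hwn : wc.1 ≤ n)
    (hlen : nxt.length = n.toNat + 1) :
    (relaxCoin row n nxt wc).length = n.toNat + 1 ∧
    ∀ x : Int, 0 ≤ x → x ≤ n →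
      getR (relaxCoin row n nxt wc) x
        = if wc.1 ≤ x then omin (getR nxt x) (oadd (getR row (x - wc.1)) wc.2)
          else getR nxt x := by
  have h := relaxCoin_row row wc.1 wc.2 n hw nxt hlen (n + 1 - wc.1).toNat (by omega)
  rw [show wc.1 + (((n + 1 - wc.1).toNat : Nat) : Int) = n + 1 by omega] at h
  obtain ⟨hl, hg⟩ := h
  simp only [relaxCoin]
  refine ⟨hl, ?_⟩
  intro x hx hxn
  rw [hg x hx]
  split_ifs with h1 h2 <;> first | rfl | omega

-- ---------- B's fold over the coin list ----------

theorem coinsFold_char (row : List (Option Int)) (n : Int) :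
    ∀ (cs : List (Int × Int)), (∀ wc ∈ cs, 1 ≤ wc.1 ∧ wc.1 ≤ n) →
    ∀ nxt : List (Option Int), nxt.length = n.toNat + 1 →
      (cs.foldl (relaxCoin row n) nxt).length = n.toNat + 1 ∧
      ∀ x : Int, 0 ≤ x → x ≤ n →
        getR (cs.foldl (relaxCoin row n) nxt) x
          = bfold (fun y => getR row y) x cs (getR nxt x) := by
  intro cs
  induction cs with
  | nil => intro _ nxt hlen; exact ⟨hlen, fun x _ _ => rfl⟩
  | cons a cs ih =>
    intro hcs nxt hlen
    have ha := hcs a (List.mem_cons_self ..)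
    obtain ⟨l1, g1⟩ := relaxCoin_char row n nxt a ha.1 ha.2 hlen
    obtain ⟨l2, g2⟩ := ih (fun wc hwc => hcs wc (List.mem_cons_of_mem _ hwc)) _ l1
    rw [List.foldl_cons]
    refine ⟨l2, ?_⟩
    intro x hx hxn
    rw [g2 x hx hxn, bfold_cons]
    congr 1
    rw [g1 x hx hxn]
    simp only [tval]

theorem passB_char (coins : List (Int × Int)) (n : Int) (hn : 0 ≤ n)
    (hcs : ∀ wc ∈ coins, 1 ≤ wc.1 ∧ wc.1 ≤ n)
    (row : List (Option Int)) (w : Int) :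
    (passB coins n row w).length = n.toNat + 1 ∧
    ∀ x : Int, 0 ≤ x → x ≤ n →
      getR (passB coins n row w) x
        = bfold (fun y => getR row y) x coins (if x = 0 then some 0 else none) := by
  obtain ⟨l, g⟩ := coinsFold_char row n coins hcs
    (some 0 :: List.replicate n.toNat (none : Option Int)) (by simp)
  simp only [passB]
  refine ⟨l, ?_⟩
  intro x hx hxn
  rw [g x hx hxn, initRow_get n x hn hx hxn]

-- ---------- B's coin list ----------

def coinsOf (m n : Int) (adj : List Int) : List (Int × Int) :=
  ((PySem.List.pyRange 1 (m+1) 1).filter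
      (fun k => decide (k ≤ n) && decide (0 < get1 adj (k-1)))).map
    (fun k => (k, get1 adj (k-1)))

theorem swF_get1 (m : Int) (adj : List Int) (k : Int) (h1 : 1 ≤ k) (h2 : k ≤ m) :
    swF m adj k = get1 adj (k-1) := by
  simp only [swF, get1]
  rw [if_pos ⟨h1, h2⟩]

theorem coins_mem (m n : Int) (adj : List Int) :
    ∀ wc ∈ coinsOf m n adj,
      1 ≤ wc.1 ∧ wc.1 ≤ m ∧ wc.1 ≤ n ∧ wc.2 = get1 adj (wc.1 - 1) ∧ 0 < wc.2 := by
  intro wc hwc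
  rw [coinsOf, List.mem_map] at hwc
  obtain ⟨k, hk, hmap⟩ := hwc
  rw [List.mem_filter] at hk
  obtain ⟨hkr, hcond⟩ := hk
  rw [PySem.List.mem_pyRange_one] at hkr
  simp only [Bool.and_eq_true, decide_eq_true_eq] at hcond
  subst hmap
  exact ⟨hkr.1, show k ≤ m by omega, hcond.1, rfl, hcond.2⟩

theorem coins_complete (m n : Int) (adj : List Int) (k : Int)
    (h1 : 1 ≤ k) (h2 : k ≤ m) (h3 : k ≤ n) (h4 : 0 < get1 adj (k-1)) :
    (k, get1 adj (k-1)) ∈ coinsOf m n adj := by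
  rw [coinsOf, List.mem_map]
  refine ⟨k, ?_, rfl⟩
  rw [List.mem_filter, PySem.List.mem_pyRange_one]
  exact ⟨⟨h1, by omega⟩, by simp [h3, h4]⟩

-- ---------- one B layer computes one more coin of FF ----------

theorem layer_eq (m n : Int) (adj : List Int) (hm : 1 ≤ m) (hn : 0 ≤ n) (hmn : m ≤ n)
    (i : Int) (hi : 0 ≤ i)
    (R : Int → Option Int) (hR : ∀ y : Int, 0 ≤ y → y ≤ n → R y = FF (swF m adj) i y m) :
    ∀ j : Int, 0 ≤ j → j ≤ n →
      bfold R j (coinsOf m n adj) (if j = 0 then some 0 else none)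
        = FF (swF m adj) (i+1) j m := by
  intro j hj hjn
  by_cases hj0 : j = 0
  · rw [hj0, FF_j_zero, if_pos rfl]
    rw [bfold_notouch]
    intro wc hwc
    have h := coins_mem m n adj wc hwc
    omega
  · rw [if_neg hj0]
    apply ole_antisymm
    · -- bfold ⊑ FF (over growing item cap)
      have H : ∀ d : Nat, (d:Int) ≤ m →
          ole (bfold R j (coinsOf m n adj) none) (FF (swF m adj) (i+1) j (d:Int)) := by
        intro d
        induction d with
        | zero =>
          intro _
          rw [show ((0:Nat):Int) = 0 by norm_num, FF_k_nonpos _ _ _ _ hj0 (le_refl 0)]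
          exact ole_none_right _
        | succ d ih =>
          intro hd
          push_cast at hd ⊢
          have ihk := ih (by omega)
          have hun : FF (swF m adj) (i+1) j ((d:Int)+1) =
              (if (d:Int)+1 ≤ j ∧ 0 < swF m adj ((d:Int)+1) then
                match FF (swF m adj) (i+1-1) (j-((d:Int)+1)) ((d:Int)+1) with
                | some s =>
                  (match FF (swF m adj) (i+1) j ((d:Int)+1-1) with
                   | none => some (s + swF m adj ((d:Int)+1))
                   | some rv => some (min (s + swF m adj ((d:Int)+1)) rv))
                | none => FF (swF m adj) (i+1) j ((d:Int)+1-1)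
              else FF (swF m adj) (i+1) j ((d:Int)+1-1)) := by
            rw [FF]
            rw [if_neg hj0, if_neg (by omega : ¬ (i+1 ≤ 0 ∨ (d:Int)+1 ≤ 0))]
          rw [hun]
          rw [show (d:Int)+1-1 = (d:Int) by ring]
          by_cases hg : (d:Int)+1 ≤ j ∧ 0 < swF m adj ((d:Int)+1)
          · rw [if_pos hg]
            cases hin : FF (swF m adj) (i+1-1) (j-((d:Int)+1)) ((d:Int)+1) with
            | none => exact ihk
            | some s =>
              have hswv : swF m adj ((d:Int)+1) = get1 adj ((d:Int)+1-1) :=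
                swF_get1 m adj ((d:Int)+1) (by omega) (by omega)
              have hmem := coins_complete m n adj ((d:Int)+1) (by omega) (by omega)
                (by omega) (by rw [← hswv]; exact hg.2)
              have h1 := bfold_le_mem R j ((d:Int)+1, get1 adj ((d:Int)+1-1)) hg.1
                (coinsOf m n adj) none hmem
              have hRk : R (j - ((d:Int)+1)) = FF (swF m adj) i (j-((d:Int)+1)) m :=
                hR _ (by omega) (by omega)
              have h2 : ole (FF (swF m adj) i (j-((d:Int)+1)) m)
                  (FF (swF m adj) i (j-((d:Int)+1)) ((d:Int)+1)) :=
                FF_mono_le _ _ _ _ _ (by omega)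
              have hin' : FF (swF m adj) i (j-((d:Int)+1)) ((d:Int)+1) = some s := by
                rw [show i+1-1 = i by ring] at hin; exact hin
              have h3 := oadd_mono (swF m adj ((d:Int)+1)) h2
              rw [hin'] at h3
              have hterm : ole (bfold R j (coinsOf m n adj) none)
                  (some (s + swF m adj ((d:Int)+1))) := by
                refine ole_trans ?_ (ole_trans h3 (by simp [oadd, ole]))
                have htv : tval R j ((d:Int)+1, get1 adj ((d:Int)+1-1))
                    = oadd (FF (swF m adj) i (j-((d:Int)+1)) m) (swF m adj ((d:Int)+1)) := by
                  simp only [tval]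
                  rw [hRk, hswv]
                rw [htv] at h1
                exact h1
              cases hr : FF (swF m adj) (i+1) j (d:Int) with
              | none => exact hterm
              | some rv =>
                have hrv : ole (bfold R j (coinsOf m n adj) none) (some rv) := by
                  rw [hr] at ihk; exact ihk
                have := ole_omin hterm hrv
                simpa only [omin] using this
          · rw [if_neg hg]
            exact ihk
      have h2 := H m.toNat (by omega)
      rwa [show ((m.toNat : Nat) : Int) = m by omega] at h2
    · -- FF ⊑ bfold: FF has every coin's option (exchange lemma)
      apply bfold_lb
      · intro wc hwc hwj
        obtain ⟨hw1, hwm, hwn, hval, hpos⟩ := coins_mem m n adj wc hwc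
        have hswv : swF m adj wc.1 = wc.2 := by
          rw [swF_get1 m adj wc.1 hw1 hwm, hval]
        have hx := FF_exchange' (swF m adj) (i+1) j m wc.1 (by omega) hw1 (by omega) hwj
          (by rw [hswv]; exact hpos)
        rw [show i+1-1 = i by ring, hswv] at hx
        have htv : tval R j wc = oadd (FF (swF m adj) i (j - wc.1) m) wc.2 := by
          simp only [tval]
          rw [hR (j - wc.1) (by omega) (by omega)]
        rw [htv]
        exact hx
      · exact ole_none_right _

-- ---------- B's outer loop ----------

theorem outer_loop (m n : Int) (adj : List Int) (hm : 1 ≤ m) (hn : 0 ≤ n) (hmn : m ≤ n) :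
    ∀ c : Nat,
      ((PySem.List.pyRange 0 (c:Int) 1).foldl (passB (coinsOf m n adj) n)
        (some 0 :: List.replicate n.toNat (none : Option Int))).length = n.toNat + 1 ∧
      ∀ j : Int, 0 ≤ j → j ≤ n →
        getR ((PySem.List.pyRange 0 (c:Int) 1).foldl (passB (coinsOf m n adj) n)
          (some 0 :: List.replicate n.toNat (none : Option Int))) j
          = FF (swF m adj) (c:Int) j m := by
  intro c
  induction c with
  | zero =>
    rw [show ((0:Nat):Int) = 0 by norm_num, PySem.List.pyRange_one_eq_nil (le_refl 0),
        List.foldl_nil]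
    refine ⟨by simp, ?_⟩
    intro j hj hjn
    rw [initRow_get n j hn hj hjn]
    by_cases hj0 : j = 0
    · rw [if_pos hj0, hj0, FF_j_zero]
    · rw [if_neg hj0, FF_i_nonpos _ _ _ _ hj0 (le_refl 0)]
  | succ c ih =>
    obtain ⟨ihlen, ihget⟩ := ih
    push_cast
    rw [PySem.List.pyRange_one_succ_right (by omega), List.foldl_append, List.foldl_cons,
        List.foldl_nil]
    set st := (PySem.List.pyRange 0 (c:Int) 1).foldl (passB (coinsOf m n adj) n)
      (some 0 :: List.replicate n.toNat (none : Option Int)) with hst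
    have hcs : ∀ wc ∈ coinsOf m n adj, 1 ≤ wc.1 ∧ wc.1 ≤ n := by
      intro wc hwc
      have h := coins_mem m n adj wc hwc
      exact ⟨h.1, h.2.2.1⟩
    obtain ⟨l2, g2⟩ := passB_char (coinsOf m n adj) n hn hcs st (c:Int)
    refine ⟨l2, ?_⟩
    intro j hj hjn
    rw [g2 j hj hjn]
    exact layer_eq m n adj hm hn hmn (c:Int) (by omega) (fun y => getR st y)
      (fun y hy hyn => ihget y hy hyn) j hj hjn

-- ===== VERDICT (by name: the statement is the Claim_ definition above) =====
theorem find_spec : Claim_equal_find := by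
  intro m n adj hdom hpre
  obtain ⟨hn, hmn, hml, hlen⟩ := hpre
  show find m n adj = find_alt m n adj
  by_cases hm : m ≤ 0
  · have hA : find m n adj = 0 := by
      by_cases hm0 : m = 0
      · rw [find_eq m n adj (by omega) hn hmn]
        by_cases hn0 : n = 0
        · rw [hn0, EE_j0]; norm_num
        · rw [EE, FF_i_nonpos _ _ _ _ hn0 (by omega)]
          simp [enc]
      · -- m < 0: every loop of A is empty and the final read hits the all-zero table
        simp only [find]
        rw [PySem.List.pyRange_one_eq_nil (by omega : m + 1 ≤ 0), List.foldl_nil, List.foldl_nil,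
            get3_rep]
        norm_num
    rw [hA]
    -- B: the outer loop is empty; row stays [0] + [None]*n
    simp only [find_alt]
    rw [PySem.List.pyRange_one_eq_nil (by omega : m ≤ 0), List.foldl_nil,
        initRow_get n n hn hn (le_refl n)]
    by_cases hn0 : n = 0
    · rw [if_pos hn0]
    · rw [if_neg hn0]
  · rw [find_eq m n adj (by omega) hn hmn]
    have hcap : FF (swF m adj) m n n = FF (swF m adj) m n m :=
      FF_cap (swF m adj) m (by omega)
        (fun x hx => by simp only [swF]; rw [if_neg (by omega)])
        (n - m).toNat m n n (by omega)
    have hout := outer_loop m n adj (by omega) hn hmn m.toNat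
    rw [show ((m.toNat : Nat) : Int) = m by omega] at hout
    have hBdef : find_alt m n adj
        = (match getR ((PySem.List.pyRange 0 m 1).foldl (passB (coinsOf m n adj) n)
              (some 0 :: List.replicate n.toNat (none : Option Int))) n with
           | none => 0
           | some v => v) := rfl
    rw [hBdef, hout.2 n hn (le_refl n), EE, hcap]
    cases hv : FF (swF m adj) m n m with
    | none => simp [enc]
    | some v =>
      have hvn := FF_nonneg _ m n m v hv
      simp only [enc]
      rw [if_neg (by omega)]
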